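-- pv_equiv track=rewrite | github.com/rpearl/advent | 2016/7.py | ssl
-- ===== SOURCE A (Python) =====
-- def ssl(line):
--     in_brackets = 0
--     supernet = set()
--     hypernet = set()
--     for i, letter in enumerate(line[:-2]):
--         if letter == "[":
--             in_brackets += 1
--         elif letter == "]":
--             in_brackets -= 1
--         else:
--             aba = (
--                 letter == line[i + 2]
--                 and letter != line[i + 1]
--                 and line[i + 1] not in "[]"
--             )
--             if aba:
--                 s = line[i : i + 3]
--                 assert "]" not in s
--                 if in_brackets == 0:
--                     supernet.add(s)
--                 else:
--                     hypernet.add(s)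
--     for s in supernet:
--         a, b, _ = s
--         if b + a + b in hypernet:
--             return True
--     return False
-- ===== SOURCE B (Python) =====
-- def ssl(line):
--     # Parse first: split the line into bracket-free segments, each tagged with
--     # its bracket depth; then scan each segment for ABA triples; then test.
--     segs = []
--     depth = 0
--     cur = []
--     for ch in line:
--         if ch == "[":
--             segs.append((depth, "".join(cur)))
--             cur = []
--             depth += 1
--         elif ch == "]":
--             segs.append((depth, "".join(cur)))
--             cur = []
--             depth -= 1
--         else:
--             cur.append(ch)
--     segs.append((depth, "".join(cur)))
--     supernet = set()
--     hypernet = set()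
--     for d, seg in segs:
--         target = supernet if d == 0 else hypernet
--         for a, b, c in zip(seg, seg[1:], seg[2:]):
--             if a == c and a != b:
--                 target.add(a + b + c)
--     return any(s[1] + s[0] + s[1] in hypernet for s in supernet)
-- ===== Notes on version B (the rewrite author's own statement) =====
-- stated objective: alternative
-- what changed: Replaces A's single indexed scan with an in_brackets counter and lookahead indexing by a parse-then-scan decomposition: the line is first split into depth-tagged bracket-free segments, then each segment is scanned for ABA triples via zip of the segment with its shifted copies, then the supernet/hypernet sets are compared.
import Mathlib
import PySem

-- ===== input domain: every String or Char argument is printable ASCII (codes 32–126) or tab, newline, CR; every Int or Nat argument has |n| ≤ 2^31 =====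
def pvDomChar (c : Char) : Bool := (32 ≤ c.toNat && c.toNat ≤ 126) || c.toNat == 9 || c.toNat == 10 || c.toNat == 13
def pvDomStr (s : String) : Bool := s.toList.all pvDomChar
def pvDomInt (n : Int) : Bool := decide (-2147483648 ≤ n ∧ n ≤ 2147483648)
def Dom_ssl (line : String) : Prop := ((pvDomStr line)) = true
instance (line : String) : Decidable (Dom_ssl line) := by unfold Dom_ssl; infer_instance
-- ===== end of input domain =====

-- B re-implements A by a parse-then-scan decomposition (depth-tagged bracket-free
-- segments, then a per-segment zip scan) instead of A's single indexed scan with a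
-- bracket counter; same return value, no speed claim.

-- ===== PORT A =====
-- Strings are modelled on the List Char side; the Python triple-strings live in
-- PySem.Set (List Char).
def sslStep (l : List Char) (st : Int × PySem.Set (List Char) × PySem.Set (List Char))
    (p : Int × Char) : Int × PySem.Set (List Char) × PySem.Set (List Char) :=
  let ib := st.1
  let sup := st.2.1
  let hyp := st.2.2
  let i := p.1
  let letter := p.2
  if letter = '[' then (ib + 1, sup, hyp)
  else if letter = ']' then (ib - 1, sup, hyp)
  else
    -- line[i+1], line[i+2]: in range for every i of A's loop (i ≤ len-3), ported with pyGetD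
    let c1 := PySem.List.pyGetD l (i + 1) ' '
    let c2 := PySem.List.pyGetD l (i + 2) ' '
    if letter = c2 ∧ letter ≠ c1 ∧ ¬ (c1 = '[' ∨ c1 = ']') then
      let s := PySem.List.slice l (some i) (some (i + 3))
      if ib = 0 then (ib, PySem.Set.add sup s, hyp) else (ib, sup, PySem.Set.add hyp s)
    else (ib, sup, hyp)

-- the final 'for s in supernet: … return True' loop (result is order-independent)
def sslFind (hyp : PySem.Set (List Char)) : List (List Char) → Bool
  | [] => false
  | s :: rest =>
    match s with
    | a :: b :: _ => if PySem.Set.contains hyp [b, a, b] then true else sslFind hyp rest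
    | _ => sslFind hyp rest   -- unreachable: every stored triple has length 3

def ssl (line : String) : Bool :=
  let l := line.toList
  let st := (PySem.List.enumerate (PySem.List.slice l none (some (-2))) 0).foldl
              (sslStep l) (0, PySem.Set.empty, PySem.Set.empty)
  sslFind st.2.2 st.2.1

-- ===== PORT B =====
def segStep (st : List (Int × List Char) × Int × List Char) (c : Char) :
    List (Int × List Char) × Int × List Char :=
  let segs := st.1
  let d := st.2.1
  let cur := st.2.2
  if c = '[' then (segs ++ [(d, cur)], d + 1, ([] : List Char))
  else if c = ']' then (segs ++ [(d, cur)], d - 1, ([] : List Char))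
  else (segs, d, cur ++ [c])

-- 'for a, b, c in zip(seg, seg[1:], seg[2:]): …' adding into supernet (d = 0) or hypernet
def segTriples (d : Int) (seg : List Char)
    (st : PySem.Set (List Char) × PySem.Set (List Char)) :
    PySem.Set (List Char) × PySem.Set (List Char) :=
  (seg.zip ((PySem.List.slice seg (some 1) none).zip (PySem.List.slice seg (some 2) none))).foldl
    (fun st p =>
      let a := p.1
      let b := p.2.1
      let c := p.2.2
      if a = c ∧ a ≠ b then
        if d = 0 then (PySem.Set.add st.1 [a, b, c], st.2) else (st.1, PySem.Set.add st.2 [a, b, c])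
      else st) st

def ssl_alt (line : String) : Bool :=
  let f := line.toList.foldl segStep (([], 0, []) : List (Int × List Char) × Int × List Char)
  let segs := f.1 ++ [(f.2.1, f.2.2)]
  let st := segs.foldl (fun st ds => segTriples ds.1 ds.2 st)
              ((PySem.Set.empty, PySem.Set.empty) : PySem.Set (List Char) × PySem.Set (List Char))
  st.1.any (fun s =>
    PySem.Set.contains st.2
      [PySem.List.pyGetD s 1 ' ', PySem.List.pyGetD s 0 ' ', PySem.List.pyGetD s 1 ' '])

-- ===== PRECONDITION & SPEC =====
def Spec_ssl (line : String) (out : Bool) : Prop := out = ssl_alt line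
instance (line : String) (out : Bool) : Decidable (Spec_ssl line out) := by unfold Spec_ssl; infer_instance

-- ===== CLAIM (what is proved, stated in full; the proofs are below) =====
def Claim_equal_ssl : Prop := ∀ (line : String), Dom_ssl line → Spec_ssl line (ssl line)

-- ===== LEMMAS AND PROOFS =====

-- shared state: (supernet, hypernet)
abbrev SS := PySem.Set (List Char) × PySem.Set (List Char)

def addT (d : Int) (t : List Char) (st : SS) : SS :=
  if d = 0 then (PySem.Set.add st.1 t, st.2) else (st.1, PySem.Set.add st.2 t)

-- window recursion equivalent to A's indexed scan (sets only)
def W (d : Int) : List Char → SS → SS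
  | a :: b :: c :: r, st =>
    if a = '[' then W (d + 1) (b :: c :: r) st
    else if a = ']' then W (d - 1) (b :: c :: r) st
    else W d (b :: c :: r)
      (if a = c ∧ a ≠ b ∧ ¬ (b = '[' ∨ b = ']') then addT d [a, b, c] st else st)
  | _, st => st

-- ABA windows of a bracket-free segment, in scan order
def winT : List Char → List (List Char)
  | a :: b :: c :: r => (if a = c ∧ a ≠ b then [[a, b, c]] else []) ++ winT (b :: c :: r)
  | _ => []

def foldAdd (d : Int) (ts : List (List Char)) (st : SS) : SS :=
  ts.foldl (fun st t => addT d t st) st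

def segsGo (d : Int) (cur : List Char) : List Char → List (Int × List Char)
  | [] => [(d, cur)]
  | c :: r =>
    if c = '[' then (d, cur) :: segsGo (d + 1) [] r
    else if c = ']' then (d, cur) :: segsGo (d - 1) [] r
    else segsGo d (cur ++ [c]) r

def fillAll (segs : List (Int × List Char)) (st : SS) : SS :=
  segs.foldl (fun st ds => foldAdd ds.1 (winT ds.2) st) st


lemma pyGetD_append_cons (pre : List Char) (x : Char) (xs : List Char) (d : Char) :
    PySem.List.pyGetD (pre ++ x :: xs) (pre.length : Int) d = x := by
  simp [PySem.List.pyGetD_natCast, List.getD]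

lemma W_short (d : Int) (l : List Char) (st : SS) (h : l.length < 3) : W d l st = st := by
  match l, h with
  | [], _ => rfl
  | [a], _ => rfl
  | [a, b], _ => rfl

lemma W_cons3 (d : Int) (a b c : Char) (r : List Char) (st : SS) :
    W d (a :: b :: c :: r) st =
      (if a = '[' then W (d + 1) (b :: c :: r) st
       else if a = ']' then W (d - 1) (b :: c :: r) st
       else W d (b :: c :: r)
         (if a = c ∧ a ≠ b ∧ ¬ (b = '[' ∨ b = ']') then addT d [a, b, c] st else st)) := rfl

lemma stage1 (suf : List Char) : ∀ (pre : List Char) (d : Int) (st : SS),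
    ((PySem.List.enumerate (suf.take (suf.length - 2)) (pre.length : Int)).foldl
        (sslStep (pre ++ suf)) (d, st)).2 = W d suf st := by
  induction suf with
  | nil => intro pre d st; simp [W_short]
  | cons a rest ih =>
    intro pre d st
    match rest with
    | [] => simp [W_short]
    | [b] => simp [W_short]
    | b :: c :: r =>
      have htake : (a :: b :: c :: r).take ((a :: b :: c :: r).length - 2)
          = a :: (b :: c :: r).take ((b :: c :: r).length - 2) := by
        simp [List.take_succ_cons]
      rw [htake, PySem.List.enumerate_cons, List.foldl_cons]
      have hget1 : PySem.List.pyGetD (pre ++ a :: b :: c :: r) ((pre.length : Int) + 1) ' ' = b := by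
        have h1 : ((pre.length : Int) + 1) = (((pre ++ [a]).length : Nat) : Int) := by simp
        rw [h1, show pre ++ a :: b :: c :: r = (pre ++ [a]) ++ b :: c :: r by simp]
        exact pyGetD_append_cons _ _ _ _
      have hget2 : PySem.List.pyGetD (pre ++ a :: b :: c :: r) ((pre.length : Int) + 2) ' ' = c := by
        have h1 : ((pre.length : Int) + 2) = (((pre ++ [a, b]).length : Nat) : Int) := by
          simp [List.length_append]
        rw [h1, show pre ++ a :: b :: c :: r = (pre ++ [a, b]) ++ c :: r by simp]
        exact pyGetD_append_cons _ _ _ _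
      have hslice : PySem.List.slice (pre ++ a :: b :: c :: r) (some (pre.length : Int))
          (some ((pre.length : Int) + 3)) = [a, b, c] := by
        rw [show ((pre.length : Int) + 3) = ((pre.length : Int) + ((3 : Nat) : Int)) by norm_num]
        rw [PySem.List.slice_natCast_add]
        simp
      have hstep : sslStep (pre ++ a :: b :: c :: r) (d, st) ((pre.length : Int), a) =
          (if a = '[' then (d + 1, st)
           else if a = ']' then (d - 1, st)
           else (d, if a = c ∧ a ≠ b ∧ ¬ (b = '[' ∨ b = ']') then addT d [a, b, c] st else st)) := by
        simp only [sslStep, hget1, hget2, hslice, addT]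
        split_ifs <;> simp_all
      rw [hstep]
      have hnext : ((pre.length : Int) + 1) = (((pre ++ [a]).length : Nat) : Int) := by simp
      rw [W_cons3]
      split_ifs with h1 h2 h3
      · subst h1
        rw [hnext, show pre ++ '[' :: b :: c :: r = (pre ++ ['[']) ++ b :: c :: r by simp]
        exact ih (pre ++ ['[']) (d + 1) st
      · subst h2
        rw [hnext, show pre ++ ']' :: b :: c :: r = (pre ++ [']']) ++ b :: c :: r by simp]
        exact ih (pre ++ [']']) (d - 1) st
      · rw [hnext, show pre ++ a :: b :: c :: r = (pre ++ [a]) ++ b :: c :: r by simp]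
        exact ih (pre ++ [a]) d _
      · rw [hnext, show pre ++ a :: b :: c :: r = (pre ++ [a]) ++ b :: c :: r by simp]
        exact ih (pre ++ [a]) d _


lemma foldAdd_append (d : Int) (ts us : List (List Char)) (st : SS) :
    foldAdd d (ts ++ us) st = foldAdd d us (foldAdd d ts st) := by
  simp [foldAdd, List.foldl_append]

lemma W_seg (seg : List Char) : ∀ (r : List Char) (d : Int) (st : SS),
    (∀ x ∈ seg, x ≠ '[' ∧ x ≠ ']') →
    (r = [] ∨ ∃ c r', r = c :: r' ∧ (c = '[' ∨ c = ']')) →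
    W d (seg ++ r) st = W d r (foldAdd d (winT seg) st) := by
  induction seg with
  | nil => intro r d st _ _; simp [foldAdd, winT]
  | cons x seg2 ih =>
    intro r d st hseg hr
    have hx : x ≠ '[' ∧ x ≠ ']' := hseg x (by simp)
    match seg2 with
    | [] =>
      rcases hr with rfl | ⟨c, r', rfl, hc⟩
      · simp [winT, foldAdd, W_short]
      · match r' with
        | [] => simp [winT, foldAdd, W_short]
        | e :: r2 =>
          rw [show [x] ++ c :: e :: r2 = x :: c :: e :: r2 by simp, W_cons3]
          rcases hc with rfl | rfl <;> simp [hx.1, hx.2, winT, foldAdd]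
    | [y] =>
      rcases hr with rfl | ⟨c, r', rfl, hc⟩
      · simp [winT, foldAdd, W_short]
      · have hy : y ≠ '[' ∧ y ≠ ']' := hseg y (by simp)
        rw [show [x, y] ++ c :: r' = x :: y :: c :: r' by simp, W_cons3]
        have hxc : ¬ (x = c ∧ x ≠ y ∧ ¬ (y = '[' ∨ y = ']')) := by
          rcases hc with rfl | rfl <;> simp [hx.1, hx.2]
        rw [if_neg hx.1, if_neg hx.2, if_neg hxc]
        have := ih (c :: r') d st (by intro z hz; exact hseg z (by simp [hz]))
          (Or.inr ⟨c, r', rfl, hc⟩)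
        simp only [List.singleton_append] at this
        rw [this]
        simp [winT, foldAdd]
    | y :: z :: seg4 =>
      have hy : y ≠ '[' ∧ y ≠ ']' := hseg y (by simp)
      rw [show (x :: y :: z :: seg4) ++ r = x :: y :: z :: (seg4 ++ r) by simp, W_cons3]
      rw [if_neg hx.1, if_neg hx.2]
      have hcond : (x = z ∧ x ≠ y ∧ ¬ (y = '[' ∨ y = ']')) ↔ (x = z ∧ x ≠ y) := by
        simp [hy.1, hy.2]
      have hih := fun st' => ih r d st' (by intro w hw; exact hseg w (by simp at hw ⊢; tauto)) hr
      rw [show y :: z :: (seg4 ++ r) = (y :: z :: seg4) ++ r by simp]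
      by_cases hc : x = z ∧ x ≠ y
      · rw [if_pos (hcond.mpr hc), hih]
        rw [show winT (x :: y :: z :: seg4)
            = [[x, y, z]] ++ winT (y :: z :: seg4) by
          obtain ⟨hc1, hc2⟩ := hc
          subst hc1
          simp [winT, hc2]]
        rw [foldAdd_append]
        rfl
      · rw [if_neg (by rw [hcond]; exact hc), hih]
        rw [show winT (x :: y :: z :: seg4) = winT (y :: z :: seg4) by simp [winT, hc]]

lemma fill_nilish (st : SS) : ∀ (l : List Char), l.length ≤ 1 →
    ∀ (d : Int), fillAll (segsGo d [] l) st = st := by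
  intro l hl d
  match l, hl with
  | [], _ => simp [segsGo, fillAll, winT, foldAdd]
  | [e], _ =>
    by_cases h1 : e = '['
    · simp [segsGo, h1, fillAll, winT, foldAdd]
    · by_cases h2 : e = ']'
      · simp [segsGo, h2, fillAll, winT, foldAdd]
      · simp [segsGo, h1, h2, fillAll, winT, foldAdd]

lemma W_eq_fill (l : List Char) : ∀ (d : Int) (cur : List Char) (st : SS),
    (∀ x ∈ cur, x ≠ '[' ∧ x ≠ ']') →
    W d (cur ++ l) st = fillAll (segsGo d cur l) st := by
  induction l with
  | nil =>
    intro d cur st hcur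
    have h := W_seg cur [] d st hcur (Or.inl rfl)
    simp only [List.append_nil] at h ⊢
    rw [h]
    simp [fillAll, segsGo, W_short]
  | cons c r ih =>
    intro d cur st hcur
    by_cases h1 : c = '['
    · subst h1
      have h := W_seg cur ('[' :: r) d st hcur (Or.inr ⟨'[', r, rfl, Or.inl rfl⟩)
      rw [h]
      rw [show segsGo d cur ('[' :: r) = (d, cur) :: segsGo (d + 1) [] r by simp [segsGo]]
      rw [show fillAll ((d, cur) :: segsGo (d + 1) [] r) st
          = fillAll (segsGo (d + 1) [] r) (foldAdd d (winT cur) st) from rfl]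
      match r with
      | [] => rw [W_short _ _ _ (by simp)]; rw [fill_nilish _ [] (by simp)]
      | [e] => rw [W_short _ _ _ (by simp)]; rw [fill_nilish _ [e] (by simp)]
      | e :: f :: r2 =>
        rw [W_cons3, if_pos rfl]
        exact ih (d + 1) [] _ (by simp)
    · by_cases h2 : c = ']'
      · subst h2
        have h := W_seg cur (']' :: r) d st hcur (Or.inr ⟨']', r, rfl, Or.inr rfl⟩)
        rw [h]
        rw [show segsGo d cur (']' :: r) = (d, cur) :: segsGo (d - 1) [] r by simp [segsGo]]
        rw [show fillAll ((d, cur) :: segsGo (d - 1) [] r) st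
            = fillAll (segsGo (d - 1) [] r) (foldAdd d (winT cur) st) from rfl]
        match r with
        | [] => rw [W_short _ _ _ (by simp)]; rw [fill_nilish _ [] (by simp)]
        | [e] => rw [W_short _ _ _ (by simp)]; rw [fill_nilish _ [e] (by simp)]
        | e :: f :: r2 =>
          rw [W_cons3, if_neg (by decide), if_pos rfl]
          exact ih (d - 1) [] _ (by simp)
      · rw [show cur ++ c :: r = (cur ++ [c]) ++ r by simp]
        rw [show segsGo d cur (c :: r) = segsGo d (cur ++ [c]) r by simp [segsGo, h1, h2]]
        refine ih d (cur ++ [c]) st ?_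
        intro w hw
        simp only [List.mem_append, List.mem_singleton] at hw
        rcases hw with hw | rfl
        · exact hcur w hw
        · exact ⟨h1, h2⟩


-- windows as (a, (b, c)) tuples, matching B's zip
def winP : List Char → List (Char × Char × Char)
  | a :: b :: c :: r => (a, (b, c)) :: winP (b :: c :: r)
  | _ => []

lemma zip_eq_winP : ∀ (seg : List Char),
    seg.zip ((seg.drop 1).zip (seg.drop 2)) = winP seg := by
  intro seg
  match seg with
  | [] => rfl
  | [a] => rfl
  | [a, b] => rfl
  | a :: b :: c :: r =>
    have := zip_eq_winP (b :: c :: r)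
    simp only [List.drop_succ_cons, List.drop_zero] at this ⊢
    simp [winP, List.zip_cons_cons]
    simpa using this

lemma winP_fold (d : Int) : ∀ (seg : List Char) (st : SS),
    (winP seg).foldl
      (fun st p =>
        let a := p.1
        let b := p.2.1
        let c := p.2.2
        if a = c ∧ a ≠ b then
          if d = 0 then (PySem.Set.add st.1 [a, b, c], st.2)
          else (st.1, PySem.Set.add st.2 [a, b, c])
        else st) st = foldAdd d (winT seg) st := by
  intro seg
  match seg with
  | [] => intro st; rfl
  | [a] => intro st; rfl
  | [a, b] => intro st; rfl
  | a :: b :: c :: r =>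
    intro st
    rw [show winP (a :: b :: c :: r) = (a, (b, c)) :: winP (b :: c :: r) from rfl,
      List.foldl_cons]
    rw [show winT (a :: b :: c :: r)
        = (if a = c ∧ a ≠ b then [[a, b, c]] else []) ++ winT (b :: c :: r) from rfl,
      foldAdd_append]
    change List.foldl _ (if a = c ∧ a ≠ b then addT d [a, b, c] st else st)
      (winP (b :: c :: r)) = _
    by_cases hc : a = c ∧ a ≠ b
    · rw [if_pos hc, if_pos hc, winP_fold d (b :: c :: r)]
      rfl
    · rw [if_neg hc, if_neg hc, winP_fold d (b :: c :: r)]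
      rfl

lemma segTriples_eq (d : Int) (seg : List Char) (st : SS) :
    segTriples d seg st = foldAdd d (winT seg) st := by
  unfold segTriples
  have hs : seg.zip ((PySem.List.slice seg (some 1) none).zip (PySem.List.slice seg (some 2) none))
      = seg.zip ((seg.drop 1).zip (seg.drop 2)) := by simp [pysem]
  rw [hs, zip_eq_winP seg]
  exact winP_fold d seg st

lemma foldl_segTriples : ∀ (segs : List (Int × List Char)) (st : SS),
    segs.foldl (fun st ds => segTriples ds.1 ds.2 st) st = fillAll segs st := by
  intro segs
  induction segs with
  | nil => intro st; rfl
  | cons ds segs ih =>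
    intro st
    rw [List.foldl_cons, ih, segTriples_eq]
    rfl

lemma segfold : ∀ (l : List Char) (segs : List (Int × List Char)) (d : Int) (cur : List Char),
    (l.foldl segStep (segs, d, cur)).1
        ++ [((l.foldl segStep (segs, d, cur)).2.1, (l.foldl segStep (segs, d, cur)).2.2)]
      = segs ++ segsGo d cur l := by
  intro l
  induction l with
  | nil => intro segs d cur; simp [segsGo]
  | cons c r ih =>
    intro segs d cur
    by_cases h1 : c = '['
    · rw [List.foldl_cons, show segStep (segs, d, cur) c = (segs ++ [(d, cur)], d + 1, ([] : List Char)) by simp [segStep, h1]]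
      rw [ih]
      simp [segsGo, h1]
    · by_cases h2 : c = ']'
      · rw [List.foldl_cons, show segStep (segs, d, cur) c = (segs ++ [(d, cur)], d - 1, ([] : List Char)) by simp [segStep, h2]]
        rw [ih]
        simp [segsGo, h2]
      · rw [List.foldl_cons, show segStep (segs, d, cur) c = (segs, d, cur ++ [c]) by simp [segStep, h1, h2]]
        rw [ih]
        simp [segsGo, h1, h2]

-- every stored triple has length ≥ 2 (in fact 3)
lemma winT_len : ∀ (seg : List Char), ∀ t ∈ winT seg, 2 ≤ t.length := by
  intro seg
  match seg with
  | [] => simp [winT]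
  | [a] => simp [winT]
  | [a, b] => simp [winT]
  | a :: b :: c :: r =>
    intro t ht
    rw [show winT (a :: b :: c :: r)
        = (if a = c ∧ a ≠ b then [[a, b, c]] else []) ++ winT (b :: c :: r) from rfl] at ht
    rcases List.mem_append.1 ht with h | h
    · split_ifs at h <;> simp_all
    · exact winT_len (b :: c :: r) t h

lemma foldAdd_fst_mem : ∀ (ts : List (List Char)) (d : Int) (st : SS) (t : List Char),
    t ∈ (foldAdd d ts st).1 → t ∈ st.1 ∨ t ∈ ts := by
  intro ts
  induction ts with
  | nil => intro d st t h; exact Or.inl h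
  | cons u ts ih =>
    intro d st t h
    rw [show foldAdd d (u :: ts) st = foldAdd d ts (addT d u st) from rfl] at h
    rcases ih d (addT d u st) t h with h' | h'
    · unfold addT at h'
      split_ifs at h'
      · rcases (PySem.Set.mem_add _ _ _).1 h' with h'' | h''
        · exact Or.inl h''
        · exact Or.inr (by simp [h''])
      · exact Or.inl h'
    · exact Or.inr (by simp [h'])

lemma fill_fst_len : ∀ (segs : List (Int × List Char)) (st : SS),
    (∀ t ∈ st.1, 2 ≤ t.length) → ∀ t ∈ (fillAll segs st).1, 2 ≤ t.length := by
  intro segs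
  induction segs with
  | nil => intro st h; exact h
  | cons ds segs ih =>
    intro st h
    rw [show fillAll (ds :: segs) st = fillAll segs (foldAdd ds.1 (winT ds.2) st) from rfl]
    refine ih _ ?_
    intro t ht
    rcases foldAdd_fst_mem _ _ _ _ ht with h' | h'
    · exact h t h'
    · exact winT_len ds.2 t h'

lemma find_any (hyp : PySem.Set (List Char)) : ∀ (sup : List (List Char)),
    (∀ s ∈ sup, 2 ≤ s.length) →
    sslFind hyp sup = sup.any (fun s =>
      PySem.Set.contains hyp
        [PySem.List.pyGetD s 1 ' ', PySem.List.pyGetD s 0 ' ', PySem.List.pyGetD s 1 ' ']) := by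
  intro sup
  induction sup with
  | nil => intro _; rfl
  | cons s rest ih =>
    intro h
    have hs := h s (by simp)
    match s, hs with
    | a :: b :: t, _ =>
      have h0 : PySem.List.pyGetD (a :: b :: t) (0 : Int) ' ' = a := by
        simp [PySem.List.pyGetD_zero_cons]
      have h1 : PySem.List.pyGetD (a :: b :: t) (1 : Int) ' ' = b := by
        rw [show (1 : Int) = ((1 : Nat) : Int) from rfl, PySem.List.pyGetD_natCast]
        rfl
      rw [List.any_cons]
      rw [show sslFind hyp ((a :: b :: t) :: rest)
          = (if PySem.Set.contains hyp [b, a, b] then true else sslFind hyp rest) from rfl]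
      rw [h0, h1, ih (fun x hx => h x (by simp [hx]))]
      by_cases hc : PySem.Set.contains hyp [b, a, b] = true <;> simp_all


-- ===== VERDICT (by name: the statement is the Claim_ definition above) =====
theorem ssl_spec : Claim_equal_ssl := by
  unfold Claim_equal_ssl Spec_ssl
  intro line _
  have hA : ssl line
      = sslFind (W 0 line.toList (PySem.Set.empty, PySem.Set.empty)).2
          (W 0 line.toList (PySem.Set.empty, PySem.Set.empty)).1 := by
    simp only [ssl]
    have hs : PySem.List.slice line.toList none (some (-2))
        = line.toList.take (line.toList.length - 2) := by simp [pysem]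
    rw [hs]
    have h := stage1 line.toList [] 0 (PySem.Set.empty, PySem.Set.empty)
    simp only [List.nil_append, List.length_nil, Nat.cast_zero] at h
    rw [h]
  have hW : W 0 line.toList (PySem.Set.empty, PySem.Set.empty)
      = fillAll (segsGo 0 [] line.toList) (PySem.Set.empty, PySem.Set.empty) := by
    have h := W_eq_fill line.toList 0 [] (PySem.Set.empty, PySem.Set.empty) (by simp)
    simpa using h
  have hB : ssl_alt line
      = (fillAll (segsGo 0 [] line.toList) (PySem.Set.empty, PySem.Set.empty)).1.any (fun s =>
          PySem.Set.contains (fillAll (segsGo 0 [] line.toList) (PySem.Set.empty, PySem.Set.empty)).2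
            [PySem.List.pyGetD s 1 ' ', PySem.List.pyGetD s 0 ' ', PySem.List.pyGetD s 1 ' ']) := by
    simp only [ssl_alt]
    rw [foldl_segTriples]
    have h := segfold line.toList [] 0 []
    simp only [List.nil_append] at h
    rw [h]
  rw [hA, hW, hB]
  exact find_any _ _ (fill_fst_len _ _ (by simp))
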